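-- pv_equiv track=rewrite | github.com/kgr0831/Krafton_Jungle | Day_10/1780(종이의 개수).py | CanCut
-- ===== SOURCE A (Python) =====
-- def CanCut(mapPaper) :
--     num = mapPaper[0][0]
--     length = len(mapPaper)
--     for i in range(length) :
--         for j in range(length) :
--             if mapPaper[i][j] != num :
--                 return None
--     return num
-- ===== SOURCE B (Python) =====
-- def CanCut(mapPaper):
--     num = mapPaper[0][0]
--     length = len(mapPaper)
--     vals = set()
--     for row in mapPaper:
--         vals.update(row[:length])
--     return num if len(vals) <= 1 else None
-- ===== Notes on version B (the rewrite author's own statement) =====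
-- stated objective: alternative
-- what changed: Replaces the early-exit nested index loops by a single set accumulation (union of each row sliced to the grid height) followed by one cardinality test: the grid is uniform iff at most one distinct value was collected.
import Mathlib
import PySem

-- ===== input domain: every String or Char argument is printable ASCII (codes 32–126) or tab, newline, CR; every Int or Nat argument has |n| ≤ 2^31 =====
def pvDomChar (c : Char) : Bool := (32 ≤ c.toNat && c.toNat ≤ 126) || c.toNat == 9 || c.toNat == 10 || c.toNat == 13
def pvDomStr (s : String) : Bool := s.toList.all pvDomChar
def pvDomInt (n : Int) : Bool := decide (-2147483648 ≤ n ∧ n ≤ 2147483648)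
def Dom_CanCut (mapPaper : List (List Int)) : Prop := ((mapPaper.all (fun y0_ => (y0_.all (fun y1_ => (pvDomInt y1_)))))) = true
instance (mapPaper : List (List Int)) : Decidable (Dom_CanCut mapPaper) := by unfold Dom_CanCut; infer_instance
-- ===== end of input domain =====

-- B replaces A's early-exit nested comparison loops by one set accumulation (union of the rows
-- sliced to the grid height) followed by a single cardinality test; equivalence is proved on
-- exactly the inputs where A returns normally (no IndexError).

-- ===== PORT A =====
-- mapPaper[i][j] (chained subscripts, none = IndexError)
def pvCellA (mp : List (List Int)) (i j : Nat) : Option Int :=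
  (PySem.List.pyGet? mp (i : Int)).bind (fun row => PySem.List.pyGet? row (j : Int))

-- the nested 'for i / for j' loops with early 'return None', flattened over the (i,j) pairs
def CanCutGo (mp : List (List Int)) (num : Int) : List (Nat × Nat) → Option Int
  | [] => some num
  | (i, j) :: rest =>
    match pvCellA mp i j with
    | none => none          -- IndexError (excluded by Pre_)
    | some v => if v ≠ num then none else CanCutGo mp num rest

def CanCut (mapPaper : List (List Int)) : Option Int :=
  match PySem.List.pyGet? mapPaper (0 : Int) with
  | none => none            -- IndexError (excluded by Pre_)
  | some row0 =>
    match PySem.List.pyGet? row0 (0 : Int) with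
    | none => none          -- IndexError (excluded by Pre_)
    | some num =>
      CanCutGo mapPaper num
        ((List.range mapPaper.length).flatMap
          (fun i => (List.range mapPaper.length).map (fun j => (i, j))))

-- ===== PORT B =====
def CanCut_alt (mapPaper : List (List Int)) : Option Int :=
  match PySem.List.pyGet? mapPaper (0 : Int) with
  | none => none            -- IndexError (excluded by Pre_)
  | some row0 =>
    match PySem.List.pyGet? row0 (0 : Int) with
    | none => none          -- IndexError (excluded by Pre_)
    | some num =>
      let length := mapPaper.length
      let vals : PySem.Set Int :=
        mapPaper.foldl
          (fun s row => PySem.Set.update s (PySem.List.slice row none (some (length : Int))))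
          PySem.Set.empty
      if vals.length ≤ 1 then some num else none

-- ===== PRECONDITION & SPEC =====
-- Pre_ is exactly where A returns normally: the grid is nonempty and, for every row shorter than
-- the grid height (whose missing cell A's row-major scan would hit with IndexError), some
-- in-square cell strictly earlier in row-major order differs from mapPaper[0][0], so A's scan
-- returns None before reaching the missing cell.
def Pre_CanCut (mapPaper : List (List Int)) : Prop :=
  mapPaper ≠ [] ∧ ∀ i < mapPaper.length, mapPaper[i]!.length < mapPaper.length →
    ∃ i' < mapPaper.length, ∃ j' < mapPaper[i']!.length,
      j' < mapPaper.length ∧ (i' < i ∨ (i' = i ∧ j' < mapPaper[i]!.length)) ∧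
        (mapPaper[i']!)[j']! ≠ (mapPaper.headD []).headD 0

instance (mapPaper : List (List Int)) : Decidable (Pre_CanCut mapPaper) := by
  unfold Pre_CanCut; infer_instance

def pvWitness_CanCut : List (List Int) := [[1, 1], [1, 2]]

def Spec_CanCut (mapPaper : List (List Int)) (out : Option Int) : Prop := out = CanCut_alt mapPaper
instance (mapPaper : List (List Int)) (out : Option Int) : Decidable (Spec_CanCut mapPaper out) := by
  unfold Spec_CanCut; infer_instance

-- ===== CLAIM (what is proved, stated in full; the proofs are below) =====
def Claim_equal_CanCut : Prop := ∀ (mapPaper : List (List Int)), Dom_CanCut mapPaper → Pre_CanCut mapPaper → Spec_CanCut mapPaper (CanCut mapPaper)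

-- ===== LEMMAS AND PROOFS =====

-- existing in-square cells, row-major: the list B's set is built from
def pvL (mp : List (List Int)) : List Int := mp.flatMap (fun row => row.take mp.length)

theorem pvCellA_eq (mp : List (List Int)) {i j : Nat}
    (hi : i < mp.length) (hj : j < mp[i].length) :
    pvCellA mp i j = some mp[i][j] := by
  simp [pvCellA, PySem.List.pyGet?_natCast, hi, hj]

-- the early-exit loop returns none as soon as any listed cell is missing or differs
theorem go_none (mp : List (List Int)) (num : Int) (ps : List (Nat × Nat)) (p : Nat × Nat)
    (hp : p ∈ ps) (hbad : pvCellA mp p.1 p.2 ≠ some num) :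
    CanCutGo mp num ps = none := by
  induction ps with
  | nil => cases hp
  | cons q rest ih =>
    obtain ⟨i, j⟩ := q
    rcases List.mem_cons.mp hp with h | h
    · subst h
      cases hv : pvCellA mp i j with
      | none => simp [CanCutGo, hv]
      | some v =>
        have : v ≠ num := fun he => hbad (by rw [hv, he])
        simp [CanCutGo, hv, this]
    · cases hv : pvCellA mp i j with
      | none => simp [CanCutGo, hv]
      | some v =>
        by_cases hveq : v = num
        · simp [CanCutGo, hv, hveq, ih h]
        · simp [CanCutGo, hv, hveq]

-- the early-exit loop characterised: all-equal → some num, otherwise none (given no IndexError)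
theorem go_char (mp : List (List Int)) (num : Int) (ps : List (Nat × Nat))
    (hs : ∀ p ∈ ps, ∃ v, pvCellA mp p.1 p.2 = some v) :
    CanCutGo mp num ps =
      if ∀ p ∈ ps, pvCellA mp p.1 p.2 = some num then some num else none := by
  induction ps with
  | nil => simp [CanCutGo]
  | cons p rest ih =>
    obtain ⟨i, j⟩ := p
    obtain ⟨v, hv⟩ := hs (i, j) (List.mem_cons_self ..)
    have ih' := ih (fun q hq => hs q (List.mem_cons_of_mem _ hq))
    by_cases hveq : v = num
    · subst hveq
      simp only [CanCutGo, hv]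
      rw [if_neg (by simp), ih']
      by_cases hall : ∀ q ∈ rest, pvCellA mp q.1 q.2 = some v
      · rw [if_pos hall, if_pos]
        intro q hq
        rcases List.mem_cons.mp hq with h | h
        · subst h; exact hv
        · exact hall q h
      · rw [if_neg hall, if_neg]
        intro hall'
        exact hall fun q hq => hall' q (List.mem_cons_of_mem _ hq)
    · simp only [CanCutGo, hv]
      rw [if_pos hveq, if_neg]
      intro hall
      have := hall (i, j) (List.mem_cons_self ..)
      rw [hv] at this
      exact hveq (Option.some.injEq .. ▸ this)

-- membership in the flat list of existing in-square cells
theorem mem_pvL (mp : List (List Int)) (x : Int) :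
    x ∈ pvL mp ↔ ∃ i, ∃ hi : i < mp.length, ∃ j, ∃ hj : j < mp[i].length,
      j < mp.length ∧ mp[i][j] = x := by
  constructor
  · intro hx
    obtain ⟨row, hrow, hxr⟩ := List.mem_flatMap.mp hx
    obtain ⟨i, hi, hieq⟩ := List.mem_iff_getElem.mp hrow
    obtain ⟨j, hjt, hjeq⟩ := List.mem_iff_getElem.mp hxr
    have hjlen : j < row.length := lt_of_lt_of_le hjt (by simp [List.length_take])
    have hjn : j < mp.length := lt_of_lt_of_le hjt (by simp [List.length_take])
    refine ⟨i, hi, j, by rw [hieq]; exact hjlen, hjn, ?_⟩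
    rw [← hjeq, List.getElem_take]
    simp only [hieq]
  · rintro ⟨i, hi, j, hj, hjn, hx⟩
    apply List.mem_flatMap.mpr
    refine ⟨mp[i], List.getElem_mem hi, ?_⟩
    rw [← hx]
    apply List.mem_iff_getElem.mpr
    exact ⟨j, by simp [List.length_take]; omega, List.getElem_take⟩

-- B's fold accumulates exactly the set of the flattened sliced rows
theorem fold_update_eq (ls : List (List Int)) (n : Nat) (s : PySem.Set Int) :
    ls.foldl (fun s row => PySem.Set.update s (PySem.List.slice row none (some (n : Int)))) s =
      PySem.Set.update s (ls.flatMap (fun row => row.take n)) := by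
  induction ls generalizing s with
  | nil => simp [PySem.Set.update]
  | cons a rest ih =>
    rw [List.foldl_cons, PySem.List.slice_to_natCast, ih, List.flatMap_cons]
    simp [PySem.Set.update, List.foldl_append]

-- a Python set has at most one element iff the underlying list is constant
theorem set_len_le_one_iff (l : List Int) :
    (PySem.Set.ofList l).length ≤ 1 ↔ ∀ x ∈ l, ∀ y ∈ l, x = y := by
  constructor
  · intro hlen x hx y hy
    have hx' : x ∈ PySem.Set.ofList l := (PySem.Set.mem_ofList _ _).mpr hx
    have hy' : y ∈ PySem.Set.ofList l := (PySem.Set.mem_ofList _ _).mpr hy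
    rcases hl : PySem.Set.ofList l with _ | ⟨a, _ | ⟨b, t⟩⟩
    · rw [hl] at hx'; cases hx'
    · rw [hl] at hx' hy'
      simp only [List.mem_singleton] at hx' hy'
      exact hx'.trans hy'.symm
    · rw [hl] at hlen; simp at hlen
  · intro hconst
    rcases hl : PySem.Set.ofList l with _ | ⟨a, _ | ⟨b, t⟩⟩
    · simp
    · simp
    · exfalso
      have hnd : (PySem.Set.ofList l).Nodup := PySem.Set.nodup_ofList _
      have ha : a ∈ l := (PySem.Set.mem_ofList _ _).mp (hl ▸ List.mem_cons_self ..)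
      have hb : b ∈ l := (PySem.Set.mem_ofList _ _).mp (hl ▸ List.mem_cons_of_mem _ (List.mem_cons_self ..))
      have hab : a = b := hconst a ha b hb
      rw [hl, hab] at hnd
      simp at hnd

-- ===== VERDICT =====
theorem CanCut_spec : Claim_equal_CanCut := by
  unfold Claim_equal_CanCut Spec_CanCut
  intro mp _ hpre
  obtain ⟨hne, hsh⟩ := hpre
  have hn : 0 < mp.length := List.length_pos_iff.mpr hne
  have hhead : mp.headD [] = mp[0] := by
    cases mp with
    | nil => exact absurd rfl hne
    | cons a t => rfl
  have hrow0len : 0 < mp[0].length := by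
    by_contra h0
    have h0' : mp[0]!.length < mp.length := by
      rw [getElem!_pos mp 0 hn]; omega
    obtain ⟨i', hi', j', hj', hjn, horder, _⟩ := hsh 0 hn h0'
    rw [getElem!_pos mp 0 hn] at horder
    omega
  have hhead0 : (mp.headD []).headD 0 = mp[0][0] := by
    rw [hhead, List.headD_eq_head?, List.head?_eq_getElem?, List.getElem?_eq_getElem hrow0len]
    rfl
  have hrow0 : PySem.List.pyGet? mp (0 : Int) = some mp[0] := by
    have : ((0 : Nat) : Int) = (0 : Int) := rfl
    rw [← this, PySem.List.pyGet?_natCast, List.getElem?_eq_getElem hn]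
  have hnum0 : PySem.List.pyGet? mp[0] (0 : Int) = some mp[0][0] := by
    have : ((0 : Nat) : Int) = (0 : Int) := rfl
    rw [← this, PySem.List.pyGet?_natCast, List.getElem?_eq_getElem hrow0len]
  set n := mp.length with hn_def
  set num := mp[0][0] with hnum_def
  set pairs := (List.range n).flatMap (fun i => (List.range n).map (fun j => (i, j)))
    with hpairs_def
  have hmem : ∀ i j : Nat, (i, j) ∈ pairs ↔ i < n ∧ j < n := by
    intro i j
    simp [hpairs_def, List.mem_flatMap, List.mem_map, List.mem_range, Prod.mk.injEq]
  have hA : CanCut mp = CanCutGo mp num pairs := by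
    simp only [CanCut, hrow0, hnum0]
    rfl
  have hB : CanCut_alt mp =
      (if (PySem.Set.ofList (pvL mp)).length ≤ 1 then some num else none) := by
    simp only [CanCut_alt, hrow0, hnum0]
    rw [fold_update_eq mp n PySem.Set.empty]
    rw [show PySem.Set.update PySem.Set.empty (mp.flatMap (fun row => List.take n row)) =
      PySem.Set.ofList (pvL mp) from PySem.Set.update_nil_left _]
  rw [hA, hB]
  by_cases hall : ∀ x ∈ pvL mp, x = num
  · -- all existing in-square cells equal num; Pre_ then forbids short rows
    have hlong : ∀ row ∈ mp, n ≤ row.length := by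
      intro row hrow
      obtain ⟨i, hi, hieq⟩ := List.mem_iff_getElem.mp hrow
      by_contra hshort
      have hshort' : mp[i]!.length < n := by
        rw [getElem!_pos mp i hi, hieq]; omega
      obtain ⟨i', hi', j', hj', hjn, _, hneq⟩ := hsh i hi hshort'
      have hj'' : j' < mp[i'].length := by rwa [getElem!_pos mp i' hi'] at hj'
      have hmemL : mp[i'][j'] ∈ pvL mp := (mem_pvL mp _).mpr ⟨i', hi', j', hj'', hjn, rfl⟩
      have := hall _ hmemL
      rw [getElem!_pos mp i' hi', getElem!_pos mp[i'] j' hj'', hhead0] at hneq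
      exact hneq this
    have hs : ∀ p ∈ pairs, ∃ v, pvCellA mp p.1 p.2 = some v := by
      intro p hp
      obtain ⟨i, j⟩ := p
      obtain ⟨hi, hj⟩ := (hmem i j).mp hp
      have hjlen : j < mp[i].length := lt_of_lt_of_le hj (hlong _ (List.getElem_mem hi))
      exact ⟨mp[i][j], pvCellA_eq mp hi hjlen⟩
    rw [go_char mp num pairs hs, if_pos, if_pos]
    · apply (set_len_le_one_iff _).mpr
      intro x hx y hy
      rw [hall x hx, hall y hy]
    · intro p hp
      obtain ⟨i, j⟩ := p
      obtain ⟨hi, hj⟩ := (hmem i j).mp hp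
      have hjlen : j < mp[i].length := lt_of_lt_of_le hj (hlong _ (List.getElem_mem hi))
      rw [pvCellA_eq mp hi hjlen]
      exact congrArg some (hall _ ((mem_pvL mp _).mpr ⟨i, hi, j, hjlen, hj, rfl⟩))
  · -- some existing in-square cell differs from num
    push Not at hall
    obtain ⟨x, hx, hxne⟩ := hall
    have hnumL : num ∈ pvL mp := (mem_pvL mp num).mpr ⟨0, hn, 0, hrow0len, hn, rfl⟩
    obtain ⟨i, hi, j, hj, hjn, hxeq⟩ := (mem_pvL mp x).mp hx
    have hbad : pvCellA mp i j ≠ some num := by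
      rw [pvCellA_eq mp hi hj, hxeq]
      exact fun h => hxne (Option.some.injEq .. ▸ h)
    rw [go_none mp num pairs (i, j) ((hmem i j).mpr ⟨hi, hjn⟩) hbad, if_neg]
    intro hlen
    exact hxne ((set_len_le_one_iff _).mp hlen x hx num hnumL)
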